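-- pv_equiv track=rewrite | github.com/zhuli19901106/leetcode-zhuli | algorithms/1501-2000/1758_minimum-changes-to-make-alternating-binary-string_1_AC.py | check
-- ===== SOURCE A (Python) =====
-- def check(s, f):
--     a = [int(c) for c in s]
--     cc = 0
--     for x in a:
--         if x != f:
--             cc += 1
--         f = 1 - f
--     return cc
-- ===== SOURCE B (Python) =====
-- def _mismatches(part, bit):
--     return sum(1 for c in part if int(c) != bit)
--
--
-- def check(s, f):
--     # parity decomposition: even positions must equal f, odd positions 1 - f
--     return _mismatches(s[::2], f) + _mismatches(s[1::2], 1 - f)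
-- ===== Notes on version B (the rewrite author's own statement) =====
-- stated objective: alternative
-- what changed: Replaces the single interleaved loop that re-flips f every step with a parity decomposition: two strided passes over s[::2] and s[1::2], each counting mismatches against a fixed expected bit (f resp. 1-f).
import Mathlib
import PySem

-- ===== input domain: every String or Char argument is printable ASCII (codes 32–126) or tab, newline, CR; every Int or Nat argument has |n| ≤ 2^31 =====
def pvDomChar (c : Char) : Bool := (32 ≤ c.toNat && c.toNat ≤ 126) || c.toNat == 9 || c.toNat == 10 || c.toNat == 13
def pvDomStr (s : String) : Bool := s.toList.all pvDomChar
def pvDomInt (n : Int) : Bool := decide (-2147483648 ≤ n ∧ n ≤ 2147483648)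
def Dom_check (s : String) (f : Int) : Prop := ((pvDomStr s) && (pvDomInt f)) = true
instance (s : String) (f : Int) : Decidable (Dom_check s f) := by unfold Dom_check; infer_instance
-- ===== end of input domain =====

-- B replaces A's interleaved loop (flipping f each step) by a parity decomposition:
-- mismatches on the even-index stride s[::2] against f plus mismatches on s[1::2] against 1 - f.


-- int(c) for a single ASCII digit character; exact on digits, which Pre_check guarantees
def pyIntDigit (c : Char) : Int := (c.toNat : Int) - 48

-- ===== PORT A =====
def check (s : String) (f : Int) : Int :=
  let a := s.toList.map (fun c => pyIntDigit c)
  (a.foldl (fun (st : Int × Int) x =>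
      (if x ≠ st.2 then st.1 + 1 else st.1, 1 - st.2)) (0, f)).1

-- ===== PORT B =====
-- sum(1 for c in part if int(c) != bit)
def bMismatches (part : List Char) (bit : Int) : Int :=
  part.foldl (fun acc c => if pyIntDigit c ≠ bit then acc + 1 else acc) 0

def check_alt (s : String) (f : Int) : Int :=
  bMismatches ((PySem.List.slice? s.toList none none 2).getD []) f
    + bMismatches ((PySem.List.slice? s.toList (some 1) none 2).getD []) (1 - f)

-- ===== PRECONDITION & SPEC =====
-- Pre: every character is an ASCII digit — exactly the inputs where int(c) does not raise ValueError
def Pre_check (s : String) (f : Int) : Prop := s.toList.all PySem.Chars.isdigit = true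
instance (s : String) (f : Int) : Decidable (Pre_check s f) := by unfold Pre_check; infer_instance
def pvWitness_check : String × Int := ("010110", 0)

def Spec_check (s : String) (f : Int) (out : Int) : Prop := out = check_alt s f
instance (s : String) (f : Int) (out : Int) : Decidable (Spec_check s f out) := by unfold Spec_check; infer_instance

-- ===== CLAIM (what is proved, stated in full; the proofs are below) =====
def Claim_equal_check : Prop := ∀ (s : String) (f : Int), Dom_check s f → Pre_check s f → Spec_check s f (check s f)

-- ===== LEMMAS AND PROOFS =====

-- the even-index elements of a list
def evens {α : Type} : List α → List α
  | [] => []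
  | [c] => [c]
  | c :: _ :: rest => c :: evens rest

theorem evens_cons {α : Type} (c : α) (cs : List α) :
    evens (c :: cs) = c :: evens (cs.drop 1) := by
  cases cs <;> simp [evens]

theorem fm_evens {α : Type} : ∀ (xs : List α),
    (List.range ((xs.length + 1) / 2)).filterMap (fun k => xs[2 * k]?) = evens xs
  | [] => by simp [evens]
  | [c] => by simp [evens]
  | c :: d :: rest => by
    have h : (c :: d :: rest).length + 1 = ((rest.length + 1) / 2 + 1) * 2 + (rest.length + 1) % 2 := by
      simp; omega
    have hlen : ((c :: d :: rest).length + 1) / 2 = (rest.length + 1) / 2 + 1 := by omega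
    rw [hlen, List.range_succ_eq_map, List.filterMap_cons, List.filterMap_map]
    have : ((fun k => (c :: d :: rest)[2 * k]?) ∘ Nat.succ) = (fun k => rest[2 * k]?) := by
      funext k
      simp [Function.comp]
      rw [show 2 * (k + 1) = 2 * k + 1 + 1 by omega]
      simp
    rw [this, fm_evens rest]
    simp [evens]

theorem fm_odds {α : Type} : ∀ (xs : List α),
    (List.range (xs.length / 2)).filterMap (fun k => xs[2 * k + 1]?) = evens (xs.drop 1)
  | [] => by simp [evens]
  | [c] => by simp [evens]
  | c :: d :: rest => by
    have hlen : (c :: d :: rest).length / 2 = rest.length / 2 + 1 := by simp; omega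
    rw [hlen, List.range_succ_eq_map, List.filterMap_cons, List.filterMap_map]
    have : ((fun k => (c :: d :: rest)[2 * k + 1]?) ∘ Nat.succ) = (fun k => rest[2 * k + 1]?) := by
      funext k
      simp [Function.comp]
      rw [show 2 * (k + 1) = 2 * k + 1 + 1 by omega]
      simp
    rw [this, fm_odds rest]
    simp [evens_cons]

theorem slice2_evens {α : Type} (xs : List α) :
    PySem.List.slice? xs none none 2 = some (evens xs) := by
  simp only [PySem.List.slice?, PySem.List.sliceIndices]
  norm_num
  rw [show (if 0 < xs.length then (((xs.length : Int) + 2 - 1) / 2).toNat else 0)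
      = (xs.length + 1) / 2 by split_ifs <;> omega]
  rw [← fm_evens xs]
  congr 1

theorem slice2_odds {α : Type} (xs : List α) :
    PySem.List.slice? xs (some 1) none 2 = some (evens (xs.drop 1)) := by
  simp only [PySem.List.slice?, PySem.List.sliceIndices]
  norm_num
  cases xs with
  | nil => simp [evens]
  | cons c cs =>
    have h1 : min (1 : Int) ((c :: cs).length : Int) = 1 := by simp
    rw [h1]
    rw [show (if 1 < (c :: cs).length then ((((c :: cs).length : Int) - 1 + 2 - 1) / 2).toNat else 0)
      = (c :: cs).length / 2 by split_ifs <;> omega]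
    rw [← List.drop_one, ← fm_odds (c :: cs)]
    congr 1
    funext k
    congr 1
    omega

theorem bMismatches_shift (cs : List Char) (bit a : Int) :
    cs.foldl (fun acc c => if pyIntDigit c ≠ bit then acc + 1 else acc) a
      = a + bMismatches cs bit := by
  induction cs generalizing a with
  | nil => simp [bMismatches]
  | cons c cs ih =>
    simp only [bMismatches, List.foldl_cons] at *
    rw [ih, ih (if pyIntDigit c ≠ bit then 0 + 1 else 0)]
    split_ifs <;> ring

theorem foldA_eq : ∀ (cs : List Char) (f cc : Int),
    (cs.foldl (fun (st : Int × Int) c =>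
        (if pyIntDigit c ≠ st.2 then st.1 + 1 else st.1, 1 - st.2)) (cc, f)).1
      = cc + bMismatches (evens cs) f + bMismatches (evens (cs.drop 1)) (1 - f)
  | [], f, cc => by simp [evens, bMismatches]
  | [c], f, cc => by
    simp [evens, bMismatches]
    split_ifs <;> ring
  | c :: d :: rest, f, cc => by
    have e1 : ∀ (x : Char) (l : List Char) (bit : Int),
        bMismatches (x :: l) bit = (if pyIntDigit x ≠ bit then (1 : Int) else 0) + bMismatches l bit := by
      intro x l bit
      conv_lhs => rw [bMismatches]
      rw [List.foldl_cons, bMismatches_shift]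
      split_ifs <;> omega
    simp only [List.foldl_cons]
    rw [show (1 : Int) - (1 - f) = f by ring]
    rw [foldA_eq rest f _]
    simp only [evens, List.drop_succ_cons, List.drop_zero, evens_cons, List.drop_one]
    rw [e1, e1]
    split_ifs <;> ring

-- ===== VERDICT (by name: the statement is the Claim_ definition above) =====
theorem check_spec : Claim_equal_check := by
  intro s f _ _
  unfold Spec_check check check_alt
  rw [slice2_evens, slice2_odds]
  simp only [Option.getD_some, List.foldl_map]
  rw [foldA_eq s.toList f 0]
  ring
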